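-- pv_equiv track=rewrite | github.com/BenWRees/simopt | WSC_Code/CoD_code.py | ASTRO_DF_refined_design_pts
-- ===== SOURCE A (Python) =====
-- def ASTRO_DF_refined_design_pts(dimension:int) -> list[tuple[int, int]] :
--     """
--     Returns a list of total design points sampled per iteration at each dimension
--     in the refined ASTRO-DF that samples 2n+2 design points per iteration but some iterations
--     sample 2n design points (when reuse is possible).
--     """
--     iterations = list(range(1, 101))
--     best_sum_design_pts_iter = lambda d : 2*d+2 + sum([2*d for _ in iterations[1:]])
--     worst_sum_design_pts_iter = lambda d : sum([2*d + 2 for _ in iterations])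
--     best_case = [best_sum_design_pts_iter(n) for n in range(1,dimension+1)]
--     worst_case = [worst_sum_design_pts_iter(n) for n in range(1,dimension+1)]
--
--
--     worst_and_best_case = [(a,b) for a, b in zip(worst_case, best_case)]
--     return worst_and_best_case
-- ===== SOURCE B (Python) =====
-- def ASTRO_DF_refined_design_pts(dimension: int) -> list[tuple[int, int]]:
--     """Closed form: 100 iterations of 2n+2 gives worst 200n+200; one 2n+2 plus 99 of 2n gives best 200n+2."""
--     return [(200 * n + 200, 200 * n + 2) for n in range(1, dimension + 1)]
-- ===== Notes on version B (the rewrite author's own statement) =====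
-- stated objective: faster
-- what changed: Replaces the materialized iterations list and the per-dimension lambda summations by closed-form arithmetic (200n+200, 200n+2) emitted directly in one comprehension.
import Mathlib
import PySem

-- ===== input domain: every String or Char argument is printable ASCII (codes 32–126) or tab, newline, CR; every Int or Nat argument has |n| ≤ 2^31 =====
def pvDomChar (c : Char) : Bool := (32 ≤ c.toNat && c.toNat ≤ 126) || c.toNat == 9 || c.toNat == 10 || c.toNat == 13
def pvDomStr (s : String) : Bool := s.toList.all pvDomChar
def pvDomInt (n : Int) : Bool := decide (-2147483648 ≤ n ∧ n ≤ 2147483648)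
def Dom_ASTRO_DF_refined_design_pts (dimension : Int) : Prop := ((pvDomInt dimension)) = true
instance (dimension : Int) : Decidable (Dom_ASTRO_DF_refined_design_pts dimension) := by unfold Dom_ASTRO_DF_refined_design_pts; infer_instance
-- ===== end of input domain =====

-- B replaces the 100-element iteration list and the per-dimension summations by the
-- closed-form counts (200n+200, 200n+2); objective: simpler.

-- ===== PORT A =====
def ASTRO_DF_refined_design_pts (dimension : Int) : List (Int × Int) :=
  let iterations : List Int := PySem.List.pyRange 1 101 1
  let best_sum_design_pts_iter : Int → Int :=
    fun d => 2 * d + 2 + ((PySem.List.slice iterations (some 1) none).map (fun _ => 2 * d)).sum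
  let worst_sum_design_pts_iter : Int → Int :=
    fun d => (iterations.map (fun _ => 2 * d + 2)).sum
  let best_case := (PySem.List.pyRange 1 (dimension + 1) 1).map best_sum_design_pts_iter
  let worst_case := (PySem.List.pyRange 1 (dimension + 1) 1).map worst_sum_design_pts_iter
  (worst_case.zip best_case).map (fun p => (p.1, p.2))

-- ===== PORT B =====
def ASTRO_DF_refined_design_pts_alt (dimension : Int) : List (Int × Int) :=
  (PySem.List.pyRange 1 (dimension + 1) 1).map (fun n => (200 * n + 200, 200 * n + 2))

-- ===== PRECONDITION & SPEC =====
def Spec_ASTRO_DF_refined_design_pts (dimension : Int) (out : List (Int × Int)) : Prop := out = ASTRO_DF_refined_design_pts_alt dimension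
instance (dimension : Int) (out : List (Int × Int)) : Decidable (Spec_ASTRO_DF_refined_design_pts dimension out) := by unfold Spec_ASTRO_DF_refined_design_pts; infer_instance

-- ===== CLAIM (what is proved, stated in full; the proofs are below) =====
def Claim_equal_ASTRO_DF_refined_design_pts : Prop := ∀ (dimension : Int), Dom_ASTRO_DF_refined_design_pts dimension → Spec_ASTRO_DF_refined_design_pts dimension (ASTRO_DF_refined_design_pts dimension)

-- ===== LEMMAS AND PROOFS =====

theorem astro_iter_sum (d : Int) :
    ((PySem.List.pyRange 1 101 1).map (fun _ => 2 * d + 2)).sum = 200 * d + 200 := by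
  rw [PySem.List.sum_map_const_int]
  rw [PySem.List.length_pyRange_one]
  norm_num; ring

theorem astro_best_sum (d : Int) :
    2 * d + 2 + ((PySem.List.slice (PySem.List.pyRange 1 101 1) (some 1) none).map
      (fun _ => 2 * d)).sum = 200 * d + 2 := by
  have h : PySem.List.slice (PySem.List.pyRange 1 101 1) (some (1:Int)) none
      = (PySem.List.pyRange 1 101 1).drop 1 := by
    exact_mod_cast PySem.List.slice_from_natCast (PySem.List.pyRange 1 101 1) 1
  rw [h, PySem.List.sum_map_const_int]
  have hl : ((PySem.List.pyRange 1 101 1).drop 1).length = 99 := by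
    simp [PySem.List.length_pyRange_one]
  rw [hl]; ring

-- ===== VERDICT (by name: the statement is the Claim_ definition above) =====
theorem ASTRO_DF_refined_design_pts_spec : Claim_equal_ASTRO_DF_refined_design_pts := by
  intro dimension _
  unfold Spec_ASTRO_DF_refined_design_pts ASTRO_DF_refined_design_pts ASTRO_DF_refined_design_pts_alt
  simp only [List.zip_map', List.map_map]
  refine List.map_congr_left (fun n _ => ?_)
  simp only [Function.comp]
  rw [astro_iter_sum, astro_best_sum]
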